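-- pv_equiv track=rewrite | github.com/ShrutiShinde418/LeetcodePractice | 1464. Maximum Product of Two Elements in an Array.py | maxProduct_3
-- ===== SOURCE A (Python) =====
-- def maxProduct_3(nums: list[int]) -> int:
--     max1 = float("-inf")
--     max2 = float("-inf")
--
--     for i in nums:
--         if i >= max1:
--             max2 = max1
--             max1 = i
--         elif i > max2:
--             max2 = i
--     return (max1 - 1) * (max2 - 1)
-- ===== SOURCE B (Python) =====
-- def maxProduct_3(nums: list[int]) -> int:
--     m1 = max(nums)
--     rest = list(nums)
--     rest.remove(m1)
--     return (m1 - 1) * (max(rest) - 1)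
-- ===== Notes on version B (the rewrite author's own statement) =====
-- stated objective: simpler
-- what changed: Replaces the single-pass dual running-tracker (max1/max2 with -inf sentinels and a branch cascade) by two passes: take the maximum, remove one occurrence of it, take the maximum of the rest.
-- outside the precondition, e.g. on maxProduct_3([]): A returns inf, B raises ValueError; on maxProduct_3([5]): A returns -inf, B raises ValueError
import Mathlib
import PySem

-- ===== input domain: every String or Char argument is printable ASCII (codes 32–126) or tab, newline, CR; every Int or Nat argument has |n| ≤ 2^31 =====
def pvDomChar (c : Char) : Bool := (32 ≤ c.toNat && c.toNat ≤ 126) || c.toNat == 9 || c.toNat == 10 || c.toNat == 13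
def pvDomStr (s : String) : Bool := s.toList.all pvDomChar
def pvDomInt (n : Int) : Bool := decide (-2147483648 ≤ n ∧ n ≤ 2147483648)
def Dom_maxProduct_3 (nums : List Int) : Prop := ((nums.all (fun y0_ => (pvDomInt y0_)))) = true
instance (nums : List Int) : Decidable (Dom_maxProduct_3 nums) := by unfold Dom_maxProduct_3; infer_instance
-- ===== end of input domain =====

-- B replaces A's single-pass dual running-tracker (with -inf sentinels) by "max, remove one
-- occurrence, max of the rest" (two passes); Pre_ = length ≥ 2 excludes inputs where A returns a float (±inf).


-- ===== PORT A =====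
-- Python's float("-inf") sentinel is ported as `none` (i ≥ -inf and i > -inf are always true).
def pyGeSent (i : Int) (m : Option Int) : Bool :=
  match m with
  | none => true
  | some v => i ≥ v

def pyGtSent (i : Int) (m : Option Int) : Bool :=
  match m with
  | none => true
  | some v => i > v

def stepA (st : Option Int × Option Int) (i : Int) : Option Int × Option Int :=
  if pyGeSent i st.1 then (some i, st.1)
  else if pyGtSent i st.2 then (st.1, some i)
  else st

def maxProduct_3 (nums : List Int) : Int :=
  match nums.foldl stepA (none, none) with
  | (some m1, some m2) => (m1 - 1) * (m2 - 1)
  | _ => 0  -- a sentinel survived: Python returns ±inf here (a float, not an int); excluded by Pre_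

-- ===== PORT B =====
def maxProduct_3_alt (nums : List Int) : Int :=
  match PySem.List.max? nums (fun x => x) with
  | none => 0  -- max([]) raises ValueError; excluded by Pre_
  | some m1 =>
    match PySem.List.remove? nums m1 with
    | none => 0  -- unreachable: m1 ∈ nums
    | some rest =>
      match PySem.List.max? rest (fun x => x) with
      | none => 0  -- max([]) raises ValueError; excluded by Pre_
      | some m2 => (m1 - 1) * (m2 - 1)

-- ===== PRECONDITION & SPEC =====
-- Pre_ excludes lists of length < 2: there A returns a float (±inf), not an int, and B raises ValueError.
def Pre_maxProduct_3 (nums : List Int) : Prop := 2 ≤ nums.length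
instance (nums : List Int) : Decidable (Pre_maxProduct_3 nums) := by unfold Pre_maxProduct_3; infer_instance

def pvWitness_maxProduct_3 : List Int := [3, 7]

def Spec_maxProduct_3 (nums : List Int) (out : Int) : Prop := out = maxProduct_3_alt nums
instance (nums : List Int) (out : Int) : Decidable (Spec_maxProduct_3 nums out) := by unfold Spec_maxProduct_3; infer_instance

-- ===== CLAIM (what is proved, stated in full; the proofs are below) =====
def Claim_equal_maxProduct_3 : Prop := ∀ (nums : List Int), Dom_maxProduct_3 nums → Pre_maxProduct_3 nums → Spec_maxProduct_3 nums (maxProduct_3 nums)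

-- ===== LEMMAS AND PROOFS =====

/-- `p` and `q` are the largest and second-largest values of `L` (with multiplicity). -/
def IsTop2 (L : List Int) (p q : Int) : Prop :=
  q ≤ p ∧ p ∈ L ∧ (∀ x ∈ L, x ≤ p) ∧ q ∈ L ∧
    L.countP (fun x => decide (q < x)) ≤ 1 ∧ 2 ≤ L.countP (fun x => decide (q ≤ x))

theorem isTop2_unique {L : List Int} {p q p' q' : Int}
    (h : IsTop2 L p q) (h' : IsTop2 L p' q') : p = p' ∧ q = q' := by
  obtain ⟨hqp, hpL, hpmax, hqL, hcnt1, hcnt2⟩ := h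
  obtain ⟨hqp', hpL', hpmax', hqL', hcnt1', hcnt2'⟩ := h'
  have hp : p = p' := le_antisymm (hpmax' p hpL) (hpmax p' hpL')
  refine ⟨hp, ?_⟩
  by_contra hne
  rcases lt_or_gt_of_ne hne with hlt | hgt
  · -- q < q' : at least two elements ≥ q' are > q, contradicting count ≤ 1
    have : L.countP (fun x => decide (q' ≤ x)) ≤ L.countP (fun x => decide (q < x)) := by
      apply List.countP_mono_left
      intro x _ hx
      simp only [decide_eq_true_eq] at *
      omega
    omega
  · have : L.countP (fun x => decide (q ≤ x)) ≤ L.countP (fun x => decide (q' < x)) := by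
      apply List.countP_mono_left
      intro x _ hx
      simp only [decide_eq_true_eq] at *
      omega
    omega

theorem isTop2_perm {L L' : List Int} {p q : Int} (hperm : L.Perm L')
    (h : IsTop2 L p q) : IsTop2 L' p q := by
  obtain ⟨hqp, hpL, hpmax, hqL, hcnt1, hcnt2⟩ := h
  exact ⟨hqp, hperm.mem_iff.mp hpL, fun x hx => hpmax x (hperm.mem_iff.mpr hx),
    hperm.mem_iff.mp hqL, hperm.countP_eq _ ▸ hcnt1, hperm.countP_eq _ ▸ hcnt2⟩

/-- A's loop invariant: from a saturated state `(a, b)` with `b ≤ a`, the fold computes the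
top two of `a :: b :: xs`. -/
theorem foldl_stepA_isTop2 (xs : List Int) : ∀ (a b : Int), b ≤ a →
    ∃ p q, xs.foldl stepA (some a, some b) = (some p, some q) ∧ IsTop2 (a :: b :: xs) p q := by
  induction xs with
  | nil =>
    intro a b hba
    refine ⟨a, b, rfl, ?_⟩
    refine ⟨hba, by simp, ?_, by simp, ?_, ?_⟩
    · intro x hx; simp at hx; rcases hx with h | h <;> omega
    · simp only [List.countP_cons, List.countP_nil, decide_eq_true_eq]; split_ifs <;> omega
    · simp only [List.countP_cons, List.countP_nil, decide_eq_true_eq]; split_ifs <;> omega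
  | cons i xs ih =>
    intro a b hba
    simp only [List.foldl_cons]
    by_cases h1 : a ≤ i
    · -- branch i >= max1: state becomes (i, a), drops b
      have hstep : stepA (some a, some b) i = (some i, some a) := by
        simp [stepA, pyGeSent, h1]
      rw [hstep]
      obtain ⟨p, q, hfold, htop⟩ := ih i a h1
      refine ⟨p, q, hfold, ?_⟩
      obtain ⟨hqp, hpL, hpmax, hqL, hcnt1, hcnt2⟩ := htop
      have hbq : b ≤ q := by
        by_contra h
        have : 2 ≤ (i :: a :: xs).countP (fun x => decide (q < x)) := by
          simp only [List.countP_cons]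
          have h1' : decide (q < i) = true := by simp only [decide_eq_true_eq]; omega
          have h2' : decide (q < a) = true := by simp only [decide_eq_true_eq]; omega
          rw [h1', h2']; simp
        omega
      refine ⟨hqp, ?_, ?_, ?_, ?_, ?_⟩
      · simp at hpL ⊢; tauto
      · intro x hx
        simp at hx
        rcases hx with h | h | h | h
        · exact hpmax x (by simp [h])
        · have : b ≤ p := le_trans hbq hqp; omega
        · exact hpmax x (by simp [h])
        · exact hpmax x (by simp; tauto)
      · simp at hqL ⊢; tauto
      · simp only [List.countP_cons, decide_eq_true_eq] at hcnt1 ⊢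
        split_ifs at hcnt1 ⊢ <;> simp_all <;> omega
      · simp only [List.countP_cons, decide_eq_true_eq] at hcnt2 ⊢
        split_ifs at hcnt2 ⊢ <;> simp_all <;> omega
    · by_cases h2 : b < i
      · -- branch i > max2: state becomes (a, i), drops b
        have hstep : stepA (some a, some b) i = (some a, some i) := by
          simp [stepA, pyGeSent, pyGtSent, h1, h2]
        rw [hstep]
        obtain ⟨p, q, hfold, htop⟩ := ih a i (by omega)
        refine ⟨p, q, hfold, ?_⟩
        obtain ⟨hqp, hpL, hpmax, hqL, hcnt1, hcnt2⟩ := htop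
        have hbq : b ≤ q := by
          by_contra h
          have : 2 ≤ (a :: i :: xs).countP (fun x => decide (q < x)) := by
            simp only [List.countP_cons]
            have h1' : decide (q < a) = true := by simp only [decide_eq_true_eq]; omega
            have h2' : decide (q < i) = true := by simp only [decide_eq_true_eq]; omega
            rw [h1', h2']; simp
          omega
        refine ⟨hqp, ?_, ?_, ?_, ?_, ?_⟩
        · simp at hpL ⊢; tauto
        · intro x hx
          simp at hx
          rcases hx with h | h | h | h
          · exact hpmax x (by simp [h])
          · have : b ≤ p := le_trans hbq hqp; omega
          · exact hpmax x (by simp [h])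
          · exact hpmax x (by simp; tauto)
        · simp at hqL ⊢; tauto
        · simp only [List.countP_cons, decide_eq_true_eq] at hcnt1 ⊢
          split_ifs at hcnt1 ⊢ <;> simp_all <;> omega
        · simp only [List.countP_cons, decide_eq_true_eq] at hcnt2 ⊢
          split_ifs at hcnt2 ⊢ <;> simp_all <;> omega
      · -- neither branch: state unchanged, drops i (i < a, i ≤ b)
        have hstep : stepA (some a, some b) i = (some a, some b) := by
          simp [stepA, pyGeSent, pyGtSent, h1, h2]
        rw [hstep]
        obtain ⟨p, q, hfold, htop⟩ := ih a b hba
        refine ⟨p, q, hfold, ?_⟩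
        obtain ⟨hqp, hpL, hpmax, hqL, hcnt1, hcnt2⟩ := htop
        have hiq : i ≤ q := by
          by_contra h
          have : 2 ≤ (a :: b :: xs).countP (fun x => decide (q < x)) := by
            simp only [List.countP_cons]
            have h1' : decide (q < a) = true := by simp only [decide_eq_true_eq]; omega
            have h2' : decide (q < b) = true := by simp only [decide_eq_true_eq]; omega
            rw [h1', h2']; simp
          omega
        refine ⟨hqp, ?_, ?_, ?_, ?_, ?_⟩
        · simp at hpL ⊢; tauto
        · intro x hx
          simp at hx
          rcases hx with h | h | h | h
          · exact hpmax x (by simp [h])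
          · exact hpmax x (by simp [h])
          · have : i ≤ p := le_trans hiq hqp; omega
          · exact hpmax x (by simp; tauto)
        · simp at hqL ⊢; tauto
        · simp only [List.countP_cons, decide_eq_true_eq] at hcnt1 ⊢
          split_ifs at hcnt1 ⊢ <;> simp_all <;> omega
        · simp only [List.countP_cons, decide_eq_true_eq] at hcnt2 ⊢
          split_ifs at hcnt2 ⊢ <;> simp_all <;> omega

/-- B's result satisfies the same characterization. -/
theorem alt_isTop2 (nums : List Int) (h : 2 ≤ nums.length) :
    ∃ p q, maxProduct_3_alt nums = (p - 1) * (q - 1) ∧ IsTop2 nums p q := by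
  have hne : nums ≠ [] := by intro h'; simp [h'] at h
  obtain ⟨m1, hm1⟩ : ∃ m1, PySem.List.max? nums (fun x => x) = some m1 := by
    cases hmx : PySem.List.max? nums (fun x => x) with
    | none => exact absurd ((PySem.List.max?_eq_none_iff nums (fun x => x)).mp hmx) hne
    | some m => exact ⟨m, rfl⟩
  have hm1mem : m1 ∈ nums := PySem.List.max?_mem hm1
  have hm1max : ∀ y ∈ nums, y ≤ m1 := PySem.List.max?_isMax hm1
  have hrem : PySem.List.remove? nums m1 = some (nums.erase m1) :=
    PySem.List.remove?_eq_some_erase nums m1 hm1mem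
  have herne : nums.erase m1 ≠ [] := by
    have := List.length_erase_of_mem hm1mem
    intro h'; rw [h'] at this; simp at this; omega
  obtain ⟨m2, hm2⟩ : ∃ m2, PySem.List.max? (nums.erase m1) (fun x => x) = some m2 := by
    cases hmx : PySem.List.max? (nums.erase m1) (fun x => x) with
    | none => exact absurd ((PySem.List.max?_eq_none_iff (nums.erase m1) (fun x => x)).mp hmx) herne
    | some m => exact ⟨m, rfl⟩
  have hm2mem : m2 ∈ nums.erase m1 := PySem.List.max?_mem hm2
  have hm2max : ∀ y ∈ nums.erase m1, y ≤ m2 := PySem.List.max?_isMax hm2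
  have hm2in : m2 ∈ nums := List.mem_of_mem_erase hm2mem
  refine ⟨m1, m2, ?_, ?_⟩
  · simp [maxProduct_3_alt, hm1, hrem, hm2]
  · have hperm : nums.Perm (m1 :: nums.erase m1) := List.perm_cons_erase hm1mem
    refine ⟨hm1max m2 hm2in, hm1mem, hm1max, hm2in, ?_, ?_⟩
    · rw [hperm.countP_eq]
      simp only [List.countP_cons]
      have : (nums.erase m1).countP (fun x => decide (m2 < x)) = 0 := by
        rw [List.countP_eq_zero]
        intro x hx
        simp only [decide_eq_true_eq, not_lt]
        exact hm2max x hx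
      rw [this]
      split_ifs <;> simp
    · rw [hperm.countP_eq]
      simp only [List.countP_cons, decide_eq_true_eq]
      have h1 : m2 ≤ m1 := hm1max m2 hm2in
      have h2 : 1 ≤ (nums.erase m1).countP (fun x => decide (m2 ≤ x)) := by
        rw [Nat.one_le_iff_ne_zero, Ne, List.countP_eq_zero]
        intro hall
        exact absurd (hall m2 hm2mem) (by simp)
      split_ifs with hif <;> omega

-- ===== VERDICT (by name: the statement is the Claim_ definition above) =====
theorem maxProduct_3_spec : Claim_equal_maxProduct_3 := by
  intro nums _hdom hpre
  unfold Spec_maxProduct_3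
  unfold Pre_maxProduct_3 at hpre
  match nums, hpre with
  | x :: y :: rest, _ =>
    -- run the first two loop iterations through the sentinels by hand
    have hfold2 : ∃ a b, b ≤ a ∧ (x :: y :: rest).foldl stepA (none, none) =
        rest.foldl stepA (some a, some b) ∧ (x :: y :: rest).Perm (a :: b :: rest) := by
      by_cases hxy : x ≤ y
      · refine ⟨y, x, hxy, ?_, List.Perm.swap y x rest⟩
        simp [stepA, pyGeSent, hxy]
      · refine ⟨x, y, by omega, ?_, List.Perm.refl _⟩
        have : ¬ (x ≤ y) := hxy
        simp [stepA, pyGeSent, pyGtSent, this]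
    obtain ⟨a, b, hba, hfold, hperm⟩ := hfold2
    obtain ⟨p, q, hres, htop⟩ := foldl_stepA_isTop2 rest a b hba
    obtain ⟨p', q', hres', htop'⟩ := alt_isTop2 (x :: y :: rest) (by simp)
    have htopA : IsTop2 (x :: y :: rest) p q := isTop2_perm hperm.symm htop
    obtain ⟨hpq, hq⟩ := isTop2_unique htopA htop'
    unfold maxProduct_3
    rw [hfold, hres, hres', hpq, hq]
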